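-- pv_equiv track=rewrite | github.com/naro-naro/CodingTest | 프로그래머스/0/181925. 수 조작하기 2/수 조작하기 2.py | solution
-- ===== SOURCE A (Python) =====
-- def solution(numLog):
--     answer = ''
--     for i in range(len(numLog)):
--         if i == 0:
--            continue
--         elif numLog[i] == (numLog[i-1] +1):
--             answer += 'w'
--         elif numLog[i] == (numLog[i-1] -1):
--             answer += 's'
--         elif numLog[i] == (numLog[i-1] +10):
--             answer += 'd'
--         elif numLog[i] == (numLog[i-1] -10):
--             answer += 'a'
--     return answer
-- ===== SOURCE B (Python) =====
-- def solution(numLog):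
--     table = {1: 'w', -1: 's', 10: 'd', -10: 'a'}
--
--     def solve(lo, hi):
--         # characters for the adjacent pairs (i, i+1) with lo <= i < hi,
--         # produced by divide and conquer on the index range
--         if hi - lo <= 0:
--             return ''
--         if hi - lo == 1:
--             return table.get(numLog[lo + 1] - numLog[lo], '')
--         mid = (lo + hi) // 2
--         return solve(lo, mid) + solve(mid, hi)
--
--     return solve(0, len(numLog) - 1)
-- ===== Notes on version B (the rewrite author's own statement) =====
-- stated objective: alternative
-- what changed: Replaces A's single left-to-right indexed scan with a four-way comparison cascade and string accumulation by a divide-and-conquer recursion over the index range: each recursive call splits the pair range at the midpoint, the base case maps one difference through a lookup table, and results are concatenated.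
import Mathlib
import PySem

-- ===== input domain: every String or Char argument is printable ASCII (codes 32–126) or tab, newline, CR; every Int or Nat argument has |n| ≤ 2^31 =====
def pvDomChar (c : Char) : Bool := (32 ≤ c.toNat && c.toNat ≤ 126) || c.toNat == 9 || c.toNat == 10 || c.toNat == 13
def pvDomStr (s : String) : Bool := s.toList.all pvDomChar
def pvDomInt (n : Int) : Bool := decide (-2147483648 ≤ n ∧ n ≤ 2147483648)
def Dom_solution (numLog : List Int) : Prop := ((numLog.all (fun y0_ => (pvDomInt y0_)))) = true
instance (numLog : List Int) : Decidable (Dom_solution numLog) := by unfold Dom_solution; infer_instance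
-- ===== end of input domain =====

-- B replaces A's left-to-right indexed scan with a four-way cascade by a
-- divide-and-conquer recursion over the index range of adjacent pairs, with a
-- lookup table at the single-pair base case (objective: alternative).

-- ===== PORT A =====
def solution (numLog : List Int) : String :=
  (PySem.List.pyRange 0 (numLog.length : Int) 1).foldl
    (fun answer i =>
      if i = 0 then answer
      else if PySem.List.pyGetD numLog i 0 = PySem.List.pyGetD numLog (i - 1) 0 + 1 then
        answer ++ "w"
      else if PySem.List.pyGetD numLog i 0 = PySem.List.pyGetD numLog (i - 1) 0 - 1 then
        answer ++ "s"
      else if PySem.List.pyGetD numLog i 0 = PySem.List.pyGetD numLog (i - 1) 0 + 10 then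
        answer ++ "d"
      else if PySem.List.pyGetD numLog i 0 = PySem.List.pyGetD numLog (i - 1) 0 - 10 then
        answer ++ "a"
      else answer) ""

-- ===== PORT B =====
def pvTable : PySem.Dict Int String := PySem.Dict.mk [(1, "w"), (-1, "s"), (10, "d"), (-10, "a")]

def solutionSolve (numLog : List Int) (lo hi : Int) : String :=
  if hi - lo ≤ 0 then ""
  else if hi - lo = 1 then
    PySem.Dict.getD pvTable
      (PySem.List.pyGetD numLog (lo + 1) 0 - PySem.List.pyGetD numLog lo 0) ""
  else
    solutionSolve numLog lo (PySem.Int.floordiv (lo + hi) 2) ++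
    solutionSolve numLog (PySem.Int.floordiv (lo + hi) 2) hi
termination_by (hi - lo).toNat
decreasing_by
  · have hm : PySem.Int.floordiv (lo + hi) 2 = (lo + hi) / 2 :=
      PySem.Int.floordiv_eq_ediv_of_pos (by norm_num)
    omega
  · have hm : PySem.Int.floordiv (lo + hi) 2 = (lo + hi) / 2 :=
      PySem.Int.floordiv_eq_ediv_of_pos (by norm_num)
    omega

def solution_alt (numLog : List Int) : String :=
  solutionSolve numLog 0 ((numLog.length : Int) - 1)

-- ===== PRECONDITION & SPEC =====
def Spec_solution (numLog : List Int) (out : String) : Prop := out = solution_alt numLog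
instance (numLog : List Int) (out : String) : Decidable (Spec_solution numLog out) := by unfold Spec_solution; infer_instance

-- ===== CLAIM (what is proved, stated in full; the proofs are below) =====
def Claim_equal_solution : Prop := ∀ (numLog : List Int), Dom_solution numLog → Spec_solution numLog (solution numLog)

-- ===== LEMMAS AND PROOFS =====

-- the character (as a string) for one adjacent pair, via B's table
def pvEnc (numLog : List Int) (lo : Int) : String :=
  PySem.Dict.getD pvTable
    (PySem.List.pyGetD numLog (lo + 1) 0 - PySem.List.pyGetD numLog lo 0) ""

-- the string of characters for the n adjacent pairs starting at index lo
def pvSeg (numLog : List Int) (lo : Int) : Nat → String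
  | 0 => ""
  | n + 1 => pvEnc numLog lo ++ pvSeg numLog (lo + 1) n

theorem pvEnc_cascade (numLog : List Int) (lo : Int) (a b : Int)
    (ha : PySem.List.pyGetD numLog lo 0 = a)
    (hb : PySem.List.pyGetD numLog (lo + 1) 0 = b) :
    pvEnc numLog lo =
      (if b = a + 1 then "w" else if b = a - 1 then "s"
       else if b = a + 10 then "d" else if b = a - 10 then "a" else "") := by
  simp only [pvEnc, ha, hb, pvTable, PySem.Dict.getD, PySem.Dict.get?_mk_cons, beq_iff_eq]
  split_ifs <;> first | rfl | omega

theorem pvSeg_split (numLog : List Int) (m n : Nat) :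
    ∀ lo : Int, pvSeg numLog lo (m + n)
      = pvSeg numLog lo m ++ pvSeg numLog (lo + (m : Int)) n := by
  induction m with
  | zero => intro lo; simp [pvSeg]
  | succ k ih =>
    intro lo
    have h1 : k + 1 + n = (k + n) + 1 := by omega
    have hc : lo + ((k + 1 : Nat) : Int) = (lo + 1) + (k : Int) := by push_cast; ring
    rw [h1, hc]
    simp only [pvSeg, ih (lo + 1), String.append_assoc]

theorem solve_eq_seg (numLog : List Int) :
    ∀ n : Nat, ∀ lo hi : Int, (hi - lo).toNat = n →
      solutionSolve numLog lo hi = pvSeg numLog lo n := by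
  intro n
  induction n using Nat.strong_induction_on with
  | _ n ih =>
    intro lo hi hn
    rw [solutionSolve]
    by_cases h0 : hi - lo ≤ 0
    · have : n = 0 := by omega
      simp [h0, this, pvSeg]
    · by_cases h1 : hi - lo = 1
      · have : n = 1 := by omega
        simp [h1, this, pvSeg, pvEnc]
      · have hm : PySem.Int.floordiv (lo + hi) 2 = (lo + hi) / 2 :=
          PySem.Int.floordiv_eq_ediv_of_pos (by norm_num)
        set mid := PySem.Int.floordiv (lo + hi) 2 with hmid
        have hb1 : lo + 1 ≤ mid := by omega
        have hb2 : mid ≤ hi - 1 := by omega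
        simp only [h0, h1, if_false]
        rw [ih (mid - lo).toNat (by omega) lo mid rfl,
            ih (hi - mid).toNat (by omega) mid hi rfl]
        have hsum : n = (mid - lo).toNat + (hi - mid).toNat := by omega
        rw [hsum, pvSeg_split]
        congr 2
        omega

-- indices below the old length read the old list
theorem pyGetD_append_left (ys zs : List Int) (i d : Int) (h0 : 0 ≤ i)
    (h1 : i < (ys.length : Int)) :
    PySem.List.pyGetD (ys ++ zs) i d = PySem.List.pyGetD ys i d := by
  rw [PySem.List.pyGetD_eq_getElem _ _ h0 (by simp; omega),
    PySem.List.pyGetD_eq_getElem _ _ h0 h1]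
  rw [List.getElem_append_left]

theorem pvSeg_append (ys zs : List Int) :
    ∀ n : Nat, ∀ lo : Int, 0 ≤ lo → lo + (n : Int) < (ys.length : Int) →
      pvSeg (ys ++ zs) lo n = pvSeg ys lo n := by
  intro n
  induction n with
  | zero => intro lo _ _; rfl
  | succ k ih =>
    intro lo h0 h1
    simp only [pvSeg, pvEnc,
      pyGetD_append_left ys zs lo 0 h0 (by omega),
      pyGetD_append_left ys zs (lo + 1) 0 (by omega) (by omega),
      ih (lo + 1) (by omega) (by push_cast; omega)]

theorem solution_append (ys : List Int) (x : Int) (h : ys ≠ []) :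
    solution (ys ++ [x]) = solution ys ++ pvEnc (ys ++ [x]) ((ys.length : Int) - 1) := by
  have hlen : 0 < ys.length := List.length_pos_of_ne_nil h
  have hn : ((ys ++ [x]).length : Int) = (ys.length : Int) + 1 := by simp
  unfold solution
  rw [hn, PySem.List.pyRange_one_succ_right (by positivity), List.foldl_append]
  rw [PySem.List.foldl_congr_mem _ _ (fun answer i =>
      if i = 0 then answer
      else if PySem.List.pyGetD ys i 0 = PySem.List.pyGetD ys (i - 1) 0 + 1 then
        answer ++ "w"
      else if PySem.List.pyGetD ys i 0 = PySem.List.pyGetD ys (i - 1) 0 - 1 then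
        answer ++ "s"
      else if PySem.List.pyGetD ys i 0 = PySem.List.pyGetD ys (i - 1) 0 + 10 then
        answer ++ "d"
      else if PySem.List.pyGetD ys i 0 = PySem.List.pyGetD ys (i - 1) 0 - 10 then
        answer ++ "a"
      else answer) "" ?hcong]
  case hcong =>
    intro acc i hi
    rw [PySem.List.mem_pyRange_one] at hi
    by_cases h0 : i = 0
    · simp [h0]
    · rw [pyGetD_append_left ys [x] i 0 (by omega) (by omega),
        pyGetD_append_left ys [x] (i - 1) 0 (by omega) (by omega)]
  simp only [List.foldl_cons, List.foldl_nil]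
  have hnz : ((ys.length : Int)) ≠ 0 := by omega
  rw [pvEnc_cascade (ys ++ [x]) ((ys.length : Int) - 1)
      (PySem.List.pyGetD (ys ++ [x]) ((ys.length : Int) - 1) 0)
      (PySem.List.pyGetD (ys ++ [x]) ((ys.length : Int)) 0) rfl (by congr 1; omega)]
  simp only [hnz, if_false]
  split_ifs <;> first | rfl | simp

theorem solution_eq_seg (xs : List Int) :
    solution xs = pvSeg xs 0 (xs.length - 1) := by
  induction xs using List.reverseRecOn with
  | nil => rfl
  | append_singleton ys x ih =>
    by_cases hne : ys = []
    · subst hne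
      have h1 : PySem.List.pyRange 0 1 1 = [0] := by decide
      simp [solution, h1, pvSeg]
    · have hlen : 0 < ys.length := List.length_pos_of_ne_nil hne
      rw [solution_append ys x hne, ih]
      have hlen' : (ys ++ [x]).length - 1 = (ys.length - 1) + 1 := by
        simp; omega
      rw [hlen', pvSeg_split (ys ++ [x]) (ys.length - 1) 1,
        pvSeg_append ys [x] (ys.length - 1) 0 le_rfl (by push_cast; omega)]
      have hc : (0 : Int) + ((ys.length - 1 : Nat) : Int) = (ys.length : Int) - 1 := by
        push_cast; omega
      simp only [pvSeg, hc, String.append_empty]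

-- ===== VERDICT (by name: the statement is the Claim_ definition above) =====
theorem solution_spec : Claim_equal_solution := by
  intro xs _
  show solution xs = solution_alt xs
  rw [solution_eq_seg, solution_alt,
    solve_eq_seg xs (xs.length - 1) 0 ((xs.length : Int) - 1) (by omega)]
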